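-- pv_equiv track=rewrite | github.com/arunprasaad2711/Sudoku | sudoku_solver_exp.py | check_common_row_col
-- ===== SOURCE A (Python) =====
-- def check_common_row_col(IDs):
--     num_ids = len(IDs)
--     count_rows = 0
--     count_cols = 0
--     common_row = False
--     common_col = False
--     first_row_id, first_col_id = IDs[0]
--
--     for ID in IDs:
--         i, j = ID
--         if i == first_row_id:
--             count_rows += 1
--         if j == first_col_id:
--             count_cols += 1
--
--     if count_rows == num_ids:
--         common_row = True
--     if count_cols == num_ids:
--         common_col = True
--
--     return common_row, common_col
-- ===== SOURCE B (Python) =====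
-- def check_common_row_col(IDs):
--     rows = {i for i, j in IDs}
--     cols = {j for i, j in IDs}
--     return (len(rows) == 1, len(cols) == 1)
-- ===== Notes on version B (the rewrite author's own statement) =====
-- stated objective: idiomatic
-- what changed: Replaces the count-against-first-element loop and final count==len comparisons with two set comprehensions of distinct row/column values and a cardinality-1 test.
import Mathlib
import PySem

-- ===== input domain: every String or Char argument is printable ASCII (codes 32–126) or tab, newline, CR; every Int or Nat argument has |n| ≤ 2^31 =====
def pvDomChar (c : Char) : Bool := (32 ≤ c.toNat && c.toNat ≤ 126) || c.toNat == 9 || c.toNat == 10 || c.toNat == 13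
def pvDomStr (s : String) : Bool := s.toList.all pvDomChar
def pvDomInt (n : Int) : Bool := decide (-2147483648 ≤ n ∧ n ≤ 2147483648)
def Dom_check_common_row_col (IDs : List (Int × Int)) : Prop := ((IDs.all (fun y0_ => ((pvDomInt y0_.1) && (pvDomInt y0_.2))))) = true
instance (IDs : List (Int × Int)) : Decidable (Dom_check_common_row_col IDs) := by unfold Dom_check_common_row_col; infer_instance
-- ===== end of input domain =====

-- B replaces A's count-against-the-first-element loop by two sets of distinct
-- row/column values and a cardinality-1 test (idiomatic; same O(n) cost).

-- ===== PORT A =====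
def check_common_row_col (IDs : List (Int × Int)) : Bool × Bool :=
  match PySem.List.pyGet? IDs 0 with
  | none => (false, false)   -- IDs[0] raises IndexError: outside Pre_
  | some first =>
    let counts := IDs.foldl
      (fun (p : Int × Int) ID =>
        ((if ID.1 = first.1 then p.1 + 1 else p.1),
         (if ID.2 = first.2 then p.2 + 1 else p.2)))
      (0, 0)
    (decide (counts.1 = (IDs.length : Int)), decide (counts.2 = (IDs.length : Int)))

-- ===== PORT B =====
def check_common_row_col_alt (IDs : List (Int × Int)) : Bool × Bool :=
  let rows := PySem.Set.ofList (IDs.map Prod.fst)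
  let cols := PySem.Set.ofList (IDs.map Prod.snd)
  (decide (rows.length = 1), decide (cols.length = 1))

-- ===== PRECONDITION & SPEC =====
-- Pre_ excludes only the empty list, on which A raises IndexError at IDs[0].
def Pre_check_common_row_col (IDs : List (Int × Int)) : Prop := IDs ≠ []
instance (IDs : List (Int × Int)) : Decidable (Pre_check_common_row_col IDs) := by unfold Pre_check_common_row_col; infer_instance
def pvWitness_check_common_row_col : (List (Int × Int)) := [(1, 2), (1, 3)]

def Spec_check_common_row_col (IDs : List (Int × Int)) (out : Bool × Bool) : Prop := out = check_common_row_col_alt IDs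
instance (IDs : List (Int × Int)) (out : Bool × Bool) : Decidable (Spec_check_common_row_col IDs out) := by unfold Spec_check_common_row_col; infer_instance

-- ===== CLAIM (what is proved, stated in full; the proofs are below) =====
def Claim_equal_check_common_row_col : Prop := ∀ (IDs : List (Int × Int)), Dom_check_common_row_col IDs → Pre_check_common_row_col IDs → Spec_check_common_row_col IDs (check_common_row_col IDs)

-- ===== LEMMAS AND PROOFS =====

-- ofList of a list whose elements all equal the head is the singleton of the head
theorem ofList_all_eq_head (a : Int) (l : List Int) (h : ∀ b ∈ l, b = a) :
    PySem.Set.ofList (a :: l) = [a] := by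
  rw [PySem.Set.ofList_eq_foldl]
  have h0 : PySem.Set.add ([] : PySem.Set Int) a = [a] :=
    PySem.Set.add_of_not_mem (by simp)
  simp only [List.foldl_cons, h0]
  induction l with
  | nil => rfl
  | cons b t ih =>
    have hb : b = a := h b (by simp)
    simp only [List.foldl_cons, hb,
      PySem.Set.add_of_mem (show a ∈ ([a] : PySem.Set Int) by simp)]
    exact ih (fun c hc => h c (by simp [hc]))

-- the distinct-values set of a nonempty list has one element iff all values equal the head
theorem set_len_one_iff (a : Int) (l : List Int) :
    (PySem.Set.ofList (a :: l)).length = 1 ↔ ∀ b ∈ l, b = a := by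
  constructor
  · intro h1 b hb
    obtain ⟨c, hc⟩ := List.length_eq_one_iff.mp h1
    have ha : a ∈ PySem.Set.ofList (a :: l) := (PySem.Set.mem_ofList _ _).mpr (by simp)
    have hbm : b ∈ PySem.Set.ofList (a :: l) := (PySem.Set.mem_ofList _ _).mpr (by simp [hb])
    rw [hc] at ha hbm
    simp at ha hbm; omega
  · intro h
    rw [ofList_all_eq_head a l h]; rfl

theorem check_common_row_col_spec : Claim_equal_check_common_row_col := by
  intro IDs _hDom hPre
  obtain ⟨x, rest, rfl⟩ := List.exists_cons_of_ne_nil hPre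
  show check_common_row_col (x :: rest) = check_common_row_col_alt (x :: rest)
  have hget : PySem.List.pyGet? (x :: rest) 0 = some x := by
    simp [PySem.List.pyGet?, PySem.List.pyIdx?]
  simp only [check_common_row_col, check_common_row_col_alt, hget]
  have hp := PySem.List.foldl_prod_mk
    (fun (c : Int) (ID : Int × Int) => if ID.1 = x.1 then c + 1 else c)
    (fun (c : Int) (ID : Int × Int) => if ID.2 = x.2 then c + 1 else c) (x :: rest) 0 0
  rw [hp]
  have h1 := PySem.List.foldl_count_if (fun ID : Int × Int => decide (ID.1 = x.1)) (x :: rest) 0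
  have h2 := PySem.List.foldl_count_if (fun ID : Int × Int => decide (ID.2 = x.2)) (x :: rest) 0
  simp only [decide_eq_true_eq] at h1 h2
  rw [h1, h2]
  simp only [zero_add]
  congr 1
  · rw [decide_eq_decide, List.map_cons, set_len_one_iff, Nat.cast_inj,
      List.countP_eq_length]
    simp
  · rw [decide_eq_decide, List.map_cons, set_len_one_iff, Nat.cast_inj,
      List.countP_eq_length]
    simp
    tauto
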